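-- pv_equiv track=rewrite | github.com/PukyFeco/AdventOfCode2022 | day05.py | create_ship
-- ===== SOURCE A (Python) =====
-- import itertools as it
--
-- def create_ship(ship_cargo: list[str]) -> list[str]:
--     temp = ['']*len(ship_cargo[0])
--
--     for row in ship_cargo:
--             temp = [list(it.chain(*cargo)) for cargo in zip(temp, row)]
--
--     cargo = [row[:-1] for row in temp[1::4]]
--
--     for row in cargo:
--         for _ in range(row.count(' ')):
--             row.pop(row.index(' '))
--
--     cargo.insert(0, [])
--     return cargo
-- ===== SOURCE B (Python) =====
-- def create_ship(ship_cargo: list[str]) -> list[str]: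
--     width = min(map(len, ship_cargo))
--     stacks = [[]]
--     for col in range(1, width, 4):
--         stacks.append([row[col] for row in ship_cargo[:-1] if row[col] != ' '])
--     return stacks
-- ===== Notes on version B (the rewrite author's own statement) =====
-- stated objective: faster
-- what changed: B replaces A's repeated zip-transpose fold (which re-copies every partially built column on each of the n rows) plus the per-stack count/index/pop space-removal passes by computing the minimal row width once and building each stack directly with a single filtered column read.
import Mathlib
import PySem

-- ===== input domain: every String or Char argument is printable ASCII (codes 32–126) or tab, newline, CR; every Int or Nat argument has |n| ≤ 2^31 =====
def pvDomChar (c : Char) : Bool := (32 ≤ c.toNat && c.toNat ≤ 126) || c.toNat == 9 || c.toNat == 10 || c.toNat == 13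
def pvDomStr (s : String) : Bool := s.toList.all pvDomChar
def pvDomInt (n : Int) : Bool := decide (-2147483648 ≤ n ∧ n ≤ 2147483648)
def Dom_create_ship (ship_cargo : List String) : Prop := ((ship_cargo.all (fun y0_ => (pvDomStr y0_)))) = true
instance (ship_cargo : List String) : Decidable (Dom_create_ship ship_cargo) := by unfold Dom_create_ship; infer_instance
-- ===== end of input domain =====

-- B builds each stack directly from its column instead of A's full zip-transpose plus
-- repeated count/index/pop space removal; same return value on every non-empty input.

-- ===== PORT A =====
-- temp = [list(it.chain(*cargo)) for cargo in zip(temp, row)]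
def pvChainStep (t : List (List Char)) (row : String) : List (List Char) :=
  (t.zip row.toList).map (fun cargo => cargo.1 ++ [cargo.2])

-- for _ in range(count): row.pop(row.index(' '))  — each step removes the first ' '
-- (the .getD row branch is unreachable: the loop runs exactly count(' ') times)
def pvPopSpaces : Nat → List Char → List Char
  | 0, row => row
  | n+1, row => pvPopSpaces n ((PySem.List.remove? row ' ').getD row)

def create_ship (ship_cargo : List String) : List (List String) :=
  match PySem.List.pyGet? ship_cargo 0 with
  | none => []  -- ship_cargo[0]: IndexError on the empty list (excluded by Pre_)
  | some row0 =>
    -- temp = ['']*len(ship_cargo[0])  (each '' is an empty char list)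
    let temp0 : List (List Char) := List.replicate row0.toList.length []
    let temp := ship_cargo.foldl pvChainStep temp0
    -- cargo = [row[:-1] for row in temp[1::4]]   (step 4 ≠ 0, so slice? is some)
    let cargo := ((PySem.List.slice? temp (some 1) none 4).getD []).map
        (fun row => PySem.List.slice row none (some (-1)))
    let cargo2 := cargo.map (fun row => pvPopSpaces (PySem.List.count row ' ') row)
    -- cargo.insert(0, []); single Python chars become 1-char strings
    (PySem.List.insert cargo2 0 ([] : List Char)).map (fun row => row.map (fun c => String.ofList [c]))

-- ===== PORT B =====
def create_ship_alt (ship_cargo : List String) : List (List String) :=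
  match PySem.List.min? (ship_cargo.map PySem.Str.len) (fun x => x) with
  | none => []  -- min() of an empty sequence: ValueError (excluded by Pre_)
  | some width =>
    -- stacks = [[]]; for col in range(1, width, 4): stacks.append([row[col] for row in ship_cargo[:-1] if row[col] != ' '])
    [[]] ++ (PySem.List.pyRange 1 width 4).map (fun col =>
      ((PySem.List.slice ship_cargo none (some (-1))).filter
          (fun row => ((PySem.Str.pyGet? row col).getD ' ') != ' ')).map
        (fun row => String.ofList [(PySem.Str.pyGet? row col).getD ' ']))

-- ===== PRECONDITION & SPEC =====
-- A raises IndexError on the empty list (ship_cargo[0]); B raises ValueError there (min of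
-- an empty sequence): the empty input is excluded, nothing else is.
def Pre_create_ship (ship_cargo : List String) : Prop := ship_cargo ≠ []
instance (ship_cargo : List String) : Decidable (Pre_create_ship ship_cargo) := by unfold Pre_create_ship; infer_instance

def pvWitness_create_ship : List String := ["[D]    ", "[N] [C]", "[Z] [M]", " 1   2 "]

def Spec_create_ship (ship_cargo : List String) (out : List (List String)) : Prop := out = create_ship_alt ship_cargo
instance (ship_cargo : List String) (out : List (List String)) : Decidable (Spec_create_ship ship_cargo out) := by unfold Spec_create_ship; infer_instance

-- ===== CLAIM (what is proved, stated in full; the proofs are below) =====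
def Claim_equal_create_ship : Prop := ∀ (ship_cargo : List String), Dom_create_ship ship_cargo → Pre_create_ship ship_cargo → Spec_create_ship ship_cargo (create_ship ship_cargo)

-- ===== LEMMAS AND PROOFS =====

-- running minimum of the row widths, starting from a
def pvW (rows : List String) (a : Nat) : Nat := (rows.map (fun r => r.toList.length)).foldl min a

theorem pvW_le (rows : List String) (a : Nat) :
    pvW rows a ≤ a ∧ ∀ r ∈ rows, pvW rows a ≤ r.toList.length := by
  unfold pvW
  have h := PySem.List.foldl_min_le (rows.map (fun r => r.toList.length)) a
  exact ⟨h.1, fun r hr => h.2 _ (List.mem_map_of_mem hr)⟩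

theorem pvChainStep_len (t : List (List Char)) (r : String) :
    (pvChainStep t r).length = min t.length r.toList.length := by
  simp [pvChainStep]

theorem pvChainStep_getD (t : List (List Char)) (r : String) (j : Nat)
    (hj : j < min t.length r.toList.length) :
    (pvChainStep t r).getD j [] = t.getD j [] ++ [r.toList.getD j ' '] := by
  have hj' : j < (t.zip r.toList).length := by rw [List.length_zip]; omega
  have h1 : j < t.length := by omega
  have h2 : j < r.toList.length := by omega
  simp only [pvChainStep, List.getD_eq_getElem?_getD]
  rw [List.getElem?_map, List.getElem?_eq_getElem hj', List.getElem?_eq_getElem h1,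
    List.getElem?_eq_getElem h2]
  simp [List.getElem_zip]

theorem pvFold_spec (rows : List String) (t : List (List Char)) :
    (rows.foldl pvChainStep t).length = pvW rows t.length ∧
    ∀ j, j < pvW rows t.length →
      (rows.foldl pvChainStep t).getD j [] = t.getD j [] ++ rows.map (fun r => r.toList.getD j ' ') := by
  induction rows generalizing t with
  | nil => simp [pvW]
  | cons r rest ih =>
    have hW : pvW (r :: rest) t.length = pvW rest (pvChainStep t r).length := by
      simp [pvW, pvChainStep_len]
    obtain ⟨ihl, ihd⟩ := ih (pvChainStep t r)
    constructor
    · simpa [hW] using ihl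
    · intro j hj
      rw [hW] at hj
      have hle : pvW rest (pvChainStep t r).length ≤ (pvChainStep t r).length :=
        (pvW_le _ _).1
      have hjm : j < min t.length r.toList.length := by
        rw [pvChainStep_len] at hle hj; omega
      have := ihd j hj
      simp only [List.foldl_cons]
      rw [this, pvChainStep_getD t r j hjm]
      simp

theorem pvPopSpaces_cons_of_ne (n : Nat) (l : List Char) (c : Char) (hc : c ≠ ' ') :
    pvPopSpaces n (c :: l) = c :: pvPopSpaces n l := by
  induction n generalizing l with
  | zero => rfl
  | succ n ih =>
    show pvPopSpaces n ((PySem.List.remove? (c :: l) ' ').getD (c :: l))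
      = c :: pvPopSpaces n ((PySem.List.remove? l ' ').getD l)
    rw [PySem.List.remove?_cons_of_ne _ hc]
    cases h : PySem.List.remove? l ' ' with
    | none => simp [ih]
    | some l' => simp [ih]

theorem pvPopSpaces_count (l : List Char) :
    pvPopSpaces (PySem.List.count l ' ') l = l.filter (fun c => c != ' ') := by
  induction l with
  | nil => rfl
  | cons c l ih =>
    by_cases hc : c = ' '
    · subst hc
      have hcount : PySem.List.count (' ' :: l) ' ' = PySem.List.count l ' ' + 1 := by
        simp [PySem.List.count]
      rw [hcount]
      show pvPopSpaces (PySem.List.count l ' ') ((PySem.List.remove? (' ' :: l) ' ').getD _)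
        = List.filter (fun c => c != ' ') (' ' :: l)
      rw [PySem.List.remove?_cons_self]
      simp [PySem.List.count] at ih
      simpa using ih
    · have hcount : PySem.List.count (c :: l) ' ' = PySem.List.count l ' ' := by
        simp [PySem.List.count, hc]
      rw [hcount, pvPopSpaces_cons_of_ne _ _ _ hc, ih]
      simp [hc]

theorem pvSlice14 {α : Type} (xs : List α) (d : α) :
    PySem.List.slice? xs (some 1) none 4 =
      some ((PySem.List.pyRange 1 (xs.length : Int) 4).map (fun i => xs.getD i.toNat d)) := by
  rcases xs with _ | ⟨x, t⟩
  · rfl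
  · set xs := x :: t with hxs
    have hlen : 1 ≤ xs.length := by simp [hxs]
    have hsi : PySem.List.sliceIndices xs.length (some 1) none 4 = (1, (xs.length : Int), 4) := by
      simp [PySem.List.sliceIndices]
      omega
    rw [PySem.List.slice?, if_neg (by norm_num), hsi]
    dsimp only
    norm_num
    rw [PySem.List.pyRange_of_pos 1 (xs.length : Int) (by norm_num), List.map_map]
    simp only [Nat.one_lt_cast]
    have hb : ∀ k ∈ List.range (if 1 < xs.length then (((xs.length : Int) - 1 + 4 - 1) / 4).toNat else 0),
        xs[((1 : Int) + 4 * (k : Int)).toNat]? = some (xs.getD ((1 : Int) + 4 * (k : Int)).toNat d) := by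
      intro k hk
      rw [List.mem_range] at hk
      have hidx : ((1 : Int) + 4 * (k : Int)).toNat < xs.length := by
        by_cases h1 : 1 < xs.length
        · rw [if_pos h1] at hk
          omega
        · rw [if_neg h1] at hk; omega
      rw [List.getElem?_eq_getElem hidx, List.getD_eq_getElem?_getD, List.getElem?_eq_getElem hidx]
      simp
    rw [List.filterMap_congr hb]
    simp [Function.comp_def]

theorem pvInsert_zero {α : Type} (xs : List α) (v : α) :
    PySem.List.insert xs 0 v = v :: xs := by
  simp [PySem.List.insert, PySem.List.sliceIndices]

theorem pvMain (r0 : String) (rest : List String) :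
    create_ship (r0 :: rest) = create_ship_alt (r0 :: rest) := by
  set rows : List String := r0 :: rest with hrows
  set n0 : Nat := r0.toList.length with hn0
  set Wn : Nat := pvW rows n0 with hWn
  set temp : List (List Char) := rows.foldl pvChainStep (List.replicate n0 []) with htemp
  -- length of temp
  have hlen : temp.length = Wn := by
    rw [htemp, (pvFold_spec rows (List.replicate n0 [])).1]
    simp [hWn]
  -- B's width
  have hmin : PySem.List.min? (rows.map PySem.Str.len) (fun x => x) = some (Wn : Int) := by
    rw [hrows]
    simp only [List.map_cons, PySem.List.min?_id_cons]
    congr 1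
    have hcast : ∀ (l : List String) (a : Nat),
        List.foldl min (a : Int) (l.map PySem.Str.len) = ((l.map (fun r => r.toList.length)).foldl min a : Nat) := by
      intro l a
      rw [List.foldl_map, List.foldl_map]
      rw [List.foldl_hom (f := fun n : Nat => (n : Int))
        (g₁ := fun m r => min m r.toList.length)
        (g₂ := fun (m : Int) (r : String) => min m (PySem.Str.len r))]
      intro x y
      simp [PySem.Str.len_eq, Nat.cast_min]
    rw [PySem.Str.len_eq r0, ← hn0, hcast rest n0, hWn, hrows, pvW]
    simp [hn0]
  -- unfold both sides
  rw [create_ship, create_ship_alt]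
  rw [show PySem.List.pyGet? rows 0 = some r0 by rw [hrows]; exact PySem.List.pyGet?_zero_cons r0 rest]
  rw [hmin]
  simp only [← hn0, ← htemp]
  rw [pvSlice14 temp [], hlen]
  rw [Option.getD_some, List.map_map, List.map_map, pvInsert_zero, List.map_cons]
  show ([] : List String) :: _ = ([] : List String) :: _
  congr 1
  rw [List.map_map]
  apply List.map_congr_left
  intro i hi
  rw [PySem.List.mem_pyRange_iff_of_pos (by norm_num)] at hi
  obtain ⟨hi1, hiW, -⟩ := hi
  have hj : i.toNat < Wn := by omega
  have hjn0 : i.toNat < n0 := by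
    have := (pvW_le rows n0).1; rw [← hWn] at this; omega
  -- temp column
  have hcol : temp.getD i.toNat [] = rows.map (fun r => r.toList.getD i.toNat ' ') := by
    have h2 := (pvFold_spec rows (List.replicate n0 [])).2 i.toNat
    rw [List.length_replicate, ← hWn, ← htemp] at h2
    rw [h2 hj, List.getD_replicate _ hjn0, List.nil_append]
  simp only [Function.comp_def]
  rw [hcol]
  rw [PySem.List.slice_to_neg_one, ← List.map_dropLast, pvPopSpaces_count, List.filter_map,
    List.map_map]
  have hget : ∀ r ∈ rows.dropLast, (PySem.Str.pyGet? r i).getD ' ' = r.toList.getD i.toNat ' ' := by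
    intro r hr
    have hrlen : Wn ≤ r.toList.length := (pvW_le rows n0).2 r (List.mem_of_mem_dropLast hr)
    have hjr : i.toNat < r.toList.length := by omega
    rw [PySem.Str.pyGet?,
      show PySem.Chars.pyGet? r.toList i = PySem.List.pyGet? r.toList i from rfl,
      PySem.List.pyGet?_of_nonneg _ (by omega : (0:Int) ≤ i), List.getElem?_eq_getElem hjr,
      List.getD_eq_getElem?_getD, List.getElem?_eq_getElem hjr]
  rw [PySem.List.slice_to_neg_one]
  have hfilter : List.filter ((fun c => c != ' ') ∘ fun r => r.toList.getD i.toNat ' ') rows.dropLast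
      = List.filter (fun row => ((PySem.Str.pyGet? row i).getD ' ') != ' ') rows.dropLast :=
    List.filter_congr (fun r hr => by simp only [Function.comp_def]; rw [hget r hr])
  rw [hfilter]
  apply List.map_congr_left
  intro r hr
  simp only [Function.comp_def]
  rw [hget r (List.mem_of_mem_filter hr)]

-- ===== VERDICT (by name: the statement is the Claim_ definition above) =====
theorem create_ship_spec : Claim_equal_create_ship := by
  intro sc _ hpre
  unfold Spec_create_ship
  rcases sc with _ | ⟨r0, rest⟩
  · exact absurd rfl hpre
  · exact pvMain r0 rest
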